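-- pv_equiv track=rewrite | github.com/ecoinvent/wastewater_treatment_tool | waste_water_tool/spold2_writer_functions.py | remove_forbiden_in_tabname
-- ===== SOURCE A (Python) =====
-- def remove_forbiden_in_tabname(s):
--     #truncates tab names in excel sheet if too long and removes forbiden characters
--
--     limit = 31
--     for before, after in [('/', '_'),
--             ('<', 'smaller than'),
--             ('>', 'larger than')]:
--         s = s.replace(before, after)
--     if len(s) > limit:
--         s = s[:limit]
--
--     return s
-- ===== SOURCE B (Python) =====
-- def remove_forbiden_in_tabname(s):
--     # table-driven single pass: one lookup per character, then truncate
--     mapping = {'/': '_', '<': 'smaller than', '>': 'larger than'}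
--     t = ''.join(mapping.get(c, c) for c in s)
--     return t[:31]
-- ===== Notes on version B (the rewrite author's own statement) =====
-- stated objective: alternative
-- what changed: Three successive whole-string str.replace scans are replaced by one table-driven pass that looks each character up in a dict and joins the pieces, truncating with an unconditional slice.
import Mathlib
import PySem

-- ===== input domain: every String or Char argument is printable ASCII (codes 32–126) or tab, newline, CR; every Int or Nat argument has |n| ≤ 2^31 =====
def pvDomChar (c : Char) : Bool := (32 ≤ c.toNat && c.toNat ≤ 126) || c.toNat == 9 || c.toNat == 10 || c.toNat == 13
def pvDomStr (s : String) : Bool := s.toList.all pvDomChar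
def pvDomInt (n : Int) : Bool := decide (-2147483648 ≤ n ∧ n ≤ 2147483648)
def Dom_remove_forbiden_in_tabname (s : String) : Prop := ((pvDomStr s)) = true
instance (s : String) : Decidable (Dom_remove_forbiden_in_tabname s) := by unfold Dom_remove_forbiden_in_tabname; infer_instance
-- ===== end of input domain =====

-- B replaces A's three successive str.replace scans by one table-driven pass (dict lookup per
-- character, joined, then an unconditional truncating slice); same return value, no speed claim.

-- ===== PORT A =====
def remove_forbiden_in_tabname (s : String) : String :=
  -- for before, after in [...]: s = s.replace(before, after)
  let s := [("/", "_"), ("<", "smaller than"), (">", "larger than")].foldl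
      (fun acc (p : String × String) => PySem.Str.replace acc p.1 p.2) s
  -- if len(s) > limit: s = s[:limit]
  if PySem.Str.len s > 31 then PySem.Str.slice s none (some 31) else s

-- ===== PORT B =====
-- mapping = {'/': '_', '<': 'smaller than', '>': 'larger than'}
def pvTabMapping : PySem.Dict Char String :=
  ⟨[('/', "_"), ('<', "smaller than"), ('>', "larger than")]⟩

def remove_forbiden_in_tabname_alt (s : String) : String :=
  -- t = ''.join(mapping.get(c, c) for c in s)
  let t := PySem.Str.join "" (s.toList.map (fun c => PySem.Dict.getD pvTabMapping c (String.ofList [c])))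
  -- return t[:31]
  PySem.Str.slice t none (some 31)

-- ===== PRECONDITION & SPEC =====
def Spec_remove_forbiden_in_tabname (s : String) (out : String) : Prop := out = remove_forbiden_in_tabname_alt s
instance (s : String) (out : String) : Decidable (Spec_remove_forbiden_in_tabname s out) := by unfold Spec_remove_forbiden_in_tabname; infer_instance

-- ===== CLAIM (what is proved, stated in full; the proofs are below) =====
def Claim_equal_remove_forbiden_in_tabname : Prop := ∀ (s : String), Dom_remove_forbiden_in_tabname s → Spec_remove_forbiden_in_tabname s (remove_forbiden_in_tabname s)

-- ===== LEMMAS AND PROOFS =====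

-- single-character replace is a flatMap
theorem replace_go_single (b : Char) (new : List Char) :
    ∀ (fuel : Nat) (l acc : List Char), l.length ≤ fuel →
      PySem.Chars.replace.go [b] new fuel l acc =
        acc.reverse ++ l.flatMap (fun c => if c = b then new else [c]) := by
  intro fuel
  induction fuel with
  | zero =>
    intro l acc h
    have : l = [] := List.eq_nil_of_length_eq_zero (Nat.le_zero.mp h)
    subst this; simp [PySem.Chars.replace.go]
  | succ n ih =>
    intro l acc h
    cases l with
    | nil => simp [PySem.Chars.replace.go]
    | cons c t =>
      by_cases hc : c = b
      · subst hc
        have hpre : List.isPrefixOf [c] (c :: t) = true := by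
          simp [List.isPrefixOf]
        rw [PySem.Chars.replace.go]
        simp only [hpre, if_pos]
        rw [ih _ _ (by simpa using Nat.le_of_succ_le_succ h)]
        simp
      · have hpre : List.isPrefixOf [b] (c :: t) = false := by
          simp [List.isPrefixOf]
          exact fun h' => hc h'.symm
        rw [PySem.Chars.replace.go, hpre]
        simp only [Bool.false_eq_true, if_false]
        rw [ih _ _ (by simpa using Nat.le_of_succ_le_succ h)]
        simp [hc]

theorem replace_single (l : List Char) (b : Char) (new : List Char) :
    PySem.Chars.replace l [b] new = l.flatMap (fun c => if c = b then new else [c]) := by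
  rw [PySem.Chars.replace, if_neg (by simp)]
  exact replace_go_single b new l.length l [] (le_refl _)

theorem three_replaces (l : List Char) :
    PySem.Chars.replace (PySem.Chars.replace (PySem.Chars.replace l ['/'] ['_'])
        ['<'] "smaller than".toList) ['>'] "larger than".toList =
      l.flatMap (fun c => (PySem.Dict.getD pvTabMapping c (String.ofList [c])).toList) := by
  simp only [replace_single, List.flatMap_assoc]
  apply List.flatMap_congr  -- pointwise
  intro c _
  by_cases h1 : c = '/'
  · subst h1; decide
  · by_cases h2 : c = '<'
    · subst h2; decide
    · by_cases h3 : c = '>'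
      · subst h3; decide
      · have e1 : ('/' == c) = false := by simp [Ne.symm h1]
        have e2 : ('<' == c) = false := by simp [Ne.symm h2]
        have e3 : ('>' == c) = false := by simp [Ne.symm h3]
        simp [h1, h2, h3, pvTabMapping, PySem.Dict.getD, PySem.Dict.get?, List.find?, e1, e2, e3]

-- truncating: A's conditional slice equals B's unconditional one
theorem take_of_slice (t : String) :
    (if PySem.Str.len t > 31 then PySem.Str.slice t none (some 31) else t) =
      PySem.Str.slice t none (some 31) := by
  split_ifs with h
  · rfl
  · rw [← String.toList_inj, PySem.Str.toList_slice, PySem.Chars.slice_eq_listSlice]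
    rw [show ((31 : Int)) = ((31 : Nat) : Int) by norm_num, PySem.List.slice_to_natCast]
    rw [List.take_of_length_le]
    simp only [PySem.Str.len, not_lt] at h
    omega

theorem join_empty_flatten : ∀ (parts : List (List Char)),
    PySem.Chars.join [] parts = parts.flatten
  | [] => PySem.Chars.join_nil []
  | [a] => by simp [PySem.Chars.join, List.intercalate]
  | a :: b :: t => by
      rw [PySem.Chars.join_cons_cons, join_empty_flatten (b :: t)]
      simp

-- ===== VERDICT (by name: the statement is the Claim_ definition above) =====
theorem remove_forbiden_in_tabname_spec : Claim_equal_remove_forbiden_in_tabname := by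
  intro s _
  show _ = _
  simp only [remove_forbiden_in_tabname, remove_forbiden_in_tabname_alt,
    List.foldl_cons, List.foldl_nil]
  rw [take_of_slice]
  have hs : PySem.Str.replace (PySem.Str.replace (PySem.Str.replace s "/" "_") "<" "smaller than") ">" "larger than"
      = PySem.Str.join "" (s.toList.map (fun c => PySem.Dict.getD pvTabMapping c (String.ofList [c]))) := by
    rw [← String.toList_inj]
    rw [PySem.Str.toList_replace, PySem.Str.toList_replace, PySem.Str.toList_replace,
      PySem.Str.toList_join]
    have e1 : "/".toList = ['/'] := rfl
    have e2 : "<".toList = ['<'] := rfl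
    have e3 : ">".toList = ['>'] := rfl
    have e4 : "".toList = ([] : List Char) := rfl
    have e5 : "_".toList = ['_'] := rfl
    rw [e1, e2, e3, e4, e5, three_replaces, join_empty_flatten, List.map_map]
    rfl
  rw [hs]
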